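-- pv_equiv track=rewrite | github.com/etherealwei/LC | leetcode_4.py | minimumDifferenceTLE
-- ===== SOURCE A (Python) =====
-- from typing import List
--
-- def minimumDifferenceTLE(nums: List[int]) -> int:
--     import math
--     seen = dict()
--     nums_total = sum(nums)
--     N = len(nums)
--
--     def recur(mask, count, total):
--         # mask - all numbers selected in the left partition
--         # return min abs difference if we are to select N//2 - count more numbers into the left partition
--         if mask in seen: return seen[mask]
--         if count == N // 2:
--             r = abs(nums_total - 2 * total)
--             seen[mask] = r
--             return r
--
--         min_diff = math.inf
--         for i in range(N):
--             if (mask & (1 << i)) != 0: continue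
--             new_mask = mask | (1 << i)
--             min_diff = min(min_diff, recur(new_mask, count + 1, total + nums[i]))
--         seen[mask] = min_diff
--         return min_diff
--
--     return recur(0, 0, 0)
-- ===== SOURCE B (Python) =====
-- from typing import List
--
-- def _half_sums(lst: List[int], k: int) -> List[int]:
--     # sums of all k-element sub-sequences of lst (take-first / skip-first recursion)
--     if k == 0:
--         return [0]
--     if len(lst) < k:
--         return []
--     rest = lst[1:]
--     return [lst[0] + s for s in _half_sums(rest, k - 1)] + _half_sums(rest, k)
--
-- def minimumDifferenceTLE(nums: List[int]) -> int:
--     total = sum(nums)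
--     return min(abs(total - 2 * s) for s in _half_sums(nums, len(nums) // 2))
-- ===== Notes on version B (the rewrite author's own statement) =====
-- stated objective: alternative
-- what changed: A's memoized bitmask recursion (a dict over all ~2^N masks, each scanning all N bits) is replaced by a direct take-first/skip-first enumeration of the sums of the C(N, N//2) half-size sub-sequences, taking the min of |total - 2*s| over them.
import Mathlib
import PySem

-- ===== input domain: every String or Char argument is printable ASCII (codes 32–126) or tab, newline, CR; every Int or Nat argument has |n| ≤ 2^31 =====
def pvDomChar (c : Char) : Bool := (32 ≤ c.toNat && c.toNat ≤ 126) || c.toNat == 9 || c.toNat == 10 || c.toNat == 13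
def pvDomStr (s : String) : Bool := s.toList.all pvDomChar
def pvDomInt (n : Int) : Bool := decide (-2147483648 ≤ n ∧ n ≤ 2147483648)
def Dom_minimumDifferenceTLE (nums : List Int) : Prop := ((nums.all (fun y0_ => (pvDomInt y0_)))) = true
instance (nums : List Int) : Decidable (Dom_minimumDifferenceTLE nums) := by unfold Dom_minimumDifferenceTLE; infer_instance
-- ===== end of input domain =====

-- B replaces A's memoized bitmask recursion over all masks by a direct take/skip enumeration
-- of the sums of the half-size sub-sequences (objective: alternative algorithm).

-- ===== PORT A =====

-- Python's `min(a, b)` where either side may be `math.inf`: `none` stands for math.inf.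
def optMin : Option Int → Option Int → Option Int
  | none, b => b
  | some a, none => some a
  | some a, some b => some (min a b)

-- `recur(mask, count, total)` with the memo dict `seen` threaded through; values `Option Int`
-- (`none` = math.inf, stored only in the Python-unreachable empty-loop case).
-- `fuel` makes the recursion structural; every actual call has fuel = N//2 - count, which the
-- Python recursion never exhausts (count grows by 1 per level up to N//2).
def recurA (nums : List Int) (T : Int) (N k : Nat) (fuel : Nat) (mask count : Nat) (total : Int)
    (seen : PySem.Dict Nat (Option Int)) : Option Int × PySem.Dict Nat (Option Int) :=
  match PySem.Dict.get? seen mask with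
  | some v => (v, seen)                                   -- if mask in seen: return seen[mask]
  | none =>
    if count = k then                                     -- if count == N // 2
      let r : Option Int := some |T - 2 * total|
      (r, seen.insert mask r)
    else
      match fuel with
      | 0 => (none, seen)                                 -- unreachable: fuel = k - count > 0 here
      | fuel' + 1 =>
        -- for i in range(N): skip set bits; min_diff = min(min_diff, recur(...))
        let st := (List.range N).foldl
          (fun (st : Option Int × PySem.Dict Nat (Option Int)) i =>
            if mask &&& (1 <<< i) ≠ 0 then st
            else
              -- nums[i] with i ∈ range(N): in range, getD is exact
              let res := recurA nums T N k fuel' (mask ||| (1 <<< i)) (count + 1)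
                           (total + nums.getD i 0) st.2
              (optMin st.1 res.1, res.2))
          (none, seen)
        (st.1, st.2.insert mask st.1)

def minimumDifferenceTLE (nums : List Int) : Int :=
  let T := nums.sum
  let N := nums.length
  -- math.inf is never the result: every executed call with count < N//2 still has a free bit,
  -- so `.getD 0` is never taken (proved via the lemmas below).
  ((recurA nums T N (N / 2) (N / 2) 0 0 0 PySem.Dict.empty).1).getD 0

-- ===== PORT B =====

-- sums of all k-element sub-sequences of lst (take-first / skip-first recursion) = _half_sums
def sumsB (lst : List Int) (k : Nat) : List Int :=
  match k with
  | 0 => [0]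
  | k' + 1 =>
    if lst.length < k' + 1 then []
    else
      match lst with
      | [] => []                                          -- unreachable: length ≥ k'+1 ≥ 1
      | x :: rest => (sumsB rest k').map (fun s => x + s) ++ sumsB rest (k' + 1)
  termination_by lst.length

def minimumDifferenceTLE_alt (nums : List Int) : Int :=
  let total := nums.sum
  -- min(abs(total - 2*s) for s in _half_sums(nums, len(nums)//2)); the generator is never
  -- empty (k ≤ len(nums)), so Python's min() never raises — the [] branch is unreachable.
  match (sumsB nums (nums.length / 2)).map (fun s => |total - 2 * s|) with
  | [] => 0
  | x :: xs => xs.foldl min x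

-- ===== PRECONDITION & SPEC =====
def Spec_minimumDifferenceTLE (nums : List Int) (out : Int) : Prop := out = minimumDifferenceTLE_alt nums
instance (nums : List Int) (out : Int) : Decidable (Spec_minimumDifferenceTLE nums out) := by unfold Spec_minimumDifferenceTLE; infer_instance

-- ===== CLAIM (what is proved, stated in full; the proofs are below) =====
def Claim_equal_minimumDifferenceTLE : Prop := ∀ (nums : List Int), Dom_minimumDifferenceTLE nums → Spec_minimumDifferenceTLE nums (minimumDifferenceTLE nums)

-- ===== LEMMAS AND PROOFS =====

-- `min` of a list of candidates, none = "no candidate yet" (math.inf)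
def vmin (l : List Int) : Option Int := l.foldl (fun a x => optMin a (some x)) none

theorem optMin_none_right (a : Option Int) : optMin a none = a := by
  cases a <;> rfl
theorem optMin_assoc (a b c : Option Int) : optMin (optMin a b) c = optMin a (optMin b c) := by
  cases a <;> cases b <;> cases c <;> simp [optMin, min_assoc]
theorem foldl_optMin_some (l : List Int) : ∀ acc : Option Int,
    l.foldl (fun a x => optMin a (some x)) acc = optMin acc (vmin l) := by
  induction l with
  | nil => intro acc; simp [vmin, optMin_none_right]
  | cons x xs ih =>
    intro acc
    have hv : vmin (x :: xs) = optMin (some x) (vmin xs) := by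
      show xs.foldl _ (optMin none (some x)) = _
      exact ih (some x)
    rw [hv, List.foldl_cons, ih (optMin acc (some x)), optMin_assoc]
theorem vmin_append (l1 l2 : List Int) : vmin (l1 ++ l2) = optMin (vmin l1) (vmin l2) := by
  simp only [vmin, List.foldl_append]
  exact foldl_optMin_some l2 _
theorem foldl_optMin_flat {β : Type} (g : β → List Int) (l : List β) : ∀ acc : Option Int,
    l.foldl (fun a i => optMin a (vmin (g i))) acc = optMin acc (vmin (l.flatMap g)) := by
  induction l with
  | nil => intro acc; simp [vmin, optMin_none_right]
  | cons x xs ih =>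
    intro acc
    simp only [List.foldl_cons, ih, List.flatMap_cons, vmin_append, optMin_assoc]
theorem foldl_min_some (xs : List Int) : ∀ x : Int,
    xs.foldl (fun a y => optMin a (some y)) (some x) = some (xs.foldl min x) := by
  induction xs with
  | nil => intro x; rfl
  | cons y ys ih => intro x; simpa [optMin] using ih (min x y)
theorem vmin_eq_min? (l : List Int) : vmin l = l.min? := by
  cases l with
  | nil => rfl
  | cons x xs => simp only [vmin, List.foldl_cons, List.min?_cons']; exact foldl_min_some xs x
theorem vmin_ext (l1 l2 : List Int) (h : ∀ x, x ∈ l1 ↔ x ∈ l2) : vmin l1 = vmin l2 := by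
  rw [vmin_eq_min?, vmin_eq_min?]
  cases h1 : l1.min? with
  | none =>
    rw [List.min?_eq_none_iff] at h1
    subst h1
    cases h2 : l2.min? with
    | none => rfl
    | some b =>
      rw [List.min?_eq_some_iff] at h2
      exact absurd ((h b).mpr h2.1) (List.not_mem_nil)
  | some a =>
    rw [List.min?_eq_some_iff] at h1
    symm
    rw [List.min?_eq_some_iff]
    exact ⟨(h a).mp h1.1, fun b hb => h1.2 b ((h b).mpr hb)⟩
theorem vmin_getD_match (l : List Int) :
    (match l with | [] => (0 : Int) | x :: xs => xs.foldl min x) = (vmin l).getD 0 := by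
  cases l with
  | nil => rfl
  | cons x xs => rw [vmin_eq_min?, List.min?_cons']; rfl

-- indices not in mask, in increasing order
def freeL (N : Nat) (mask : Nat) : List Nat := (List.range N).filter (fun i => !mask.testBit i)

-- number of set bits below N / sum of nums over set bits below N
def cnt (N : Nat) (mask : Nat) : Nat := ((List.range N).filter (fun i => mask.testBit i)).length
def tot (nums : List Int) (N : Nat) (mask : Nat) : Int :=
  (((List.range N).filter (fun i => mask.testBit i)).map (fun i => nums.getD i 0)).sum

-- memo-free version of recurA
def gp (nums : List Int) (T : Int) (N k : Nat) (fuel : Nat) (mask count : Nat) (total : Int) :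
    Option Int :=
  if count = k then some |T - 2 * total|
  else
    match fuel with
    | 0 => none
    | fuel' + 1 =>
      (List.range N).foldl
        (fun acc i =>
          if mask &&& (1 <<< i) ≠ 0 then acc
          else optMin acc (gp nums T N k fuel' (mask ||| (1 <<< i)) (count + 1)
                             (total + nums.getD i 0)))
        none

theorem band_bit (mask i : Nat) : (mask &&& (1 <<< i) ≠ 0) ↔ mask.testBit i = true := by
  rw [Nat.one_shiftLeft, Nat.and_two_pow]
  cases h : mask.testBit i <;> simp

theorem freeL_nodup (N mask : Nat) : (freeL N mask).Nodup :=
  (List.nodup_range).filter _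

theorem freeL_or (N mask i : Nat) :
    freeL N (mask ||| (1 <<< i)) = (freeL N mask).filter (fun j => !(j == i)) := by
  unfold freeL
  rw [List.filter_filter]
  apply List.filter_congr
  intro j _
  rw [Nat.one_shiftLeft]
  simp [Nat.testBit_or, Nat.testBit_two_pow, eq_comm, Bool.and_comm, beq_eq_decide]

theorem filter_or_perm {l : List Nat} {i : Nat} (p : Nat → Bool) (hn : l.Nodup) (hi : i ∈ l)
    (hp : p i = false) :
    (l.filter (fun j => p j || (j == i))).Perm (i :: l.filter p) := by
  obtain ⟨l1, l2, rfl⟩ := List.append_of_mem hi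
  have h1 : i ∉ l1 ∧ i ∉ l2 := by
    simp [List.nodup_append, List.nodup_cons] at hn
    exact ⟨fun hmem => (hn.2.2 i hmem).1 rfl, hn.2.1.1⟩
  have e1 : ∀ (m : List Nat), i ∉ m → m.filter (fun j => p j || (j == i)) = m.filter p := by
    intro m him
    apply List.filter_congr
    intro a ha
    have : a ≠ i := fun h => him (h ▸ ha)
    simp [this]
  simp only [List.filter_append, List.filter_cons, hp, BEq.rfl, Bool.or_true, if_true,
    e1 l1 h1.1, e1 l2 h1.2]
  exact List.perm_middle

theorem cnt_or (N mask i : Nat) (hiN : i < N) (hb : mask.testBit i = false) :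
    cnt N (mask ||| (1 <<< i)) = cnt N mask + 1 := by
  have hperm := filter_or_perm (l := List.range N) (i := i) (fun j => mask.testBit j)
    (List.nodup_range) (List.mem_range.mpr hiN) hb
  have hpred : (fun j => (mask ||| (1 <<< i)).testBit j) = (fun j => mask.testBit j || (j == i)) := by
    funext j
    rw [Nat.one_shiftLeft]
    simp [Nat.testBit_or, Nat.testBit_two_pow, eq_comm, beq_eq_decide]
  unfold cnt
  rw [hpred, hperm.length_eq, List.length_cons]

theorem tot_or (nums : List Int) (N mask i : Nat) (hiN : i < N) (hb : mask.testBit i = false) :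
    tot nums N (mask ||| (1 <<< i)) = tot nums N mask + nums.getD i 0 := by
  have hperm := filter_or_perm (l := List.range N) (i := i) (fun j => mask.testBit j)
    (List.nodup_range) (List.mem_range.mpr hiN) hb
  have hpred : (fun j => (mask ||| (1 <<< i)).testBit j) = (fun j => mask.testBit j || (j == i)) := by
    funext j
    rw [Nat.one_shiftLeft]
    simp [Nat.testBit_or, Nat.testBit_two_pow, eq_comm, beq_eq_decide]
  unfold tot
  rw [hpred, (hperm.map (fun i => nums.getD i 0)).sum_eq, List.map_cons, List.sum_cons]
  ring

-- characterization of the memo-free recursion: min over all m-element subsets of the free indices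
theorem gp_eq (nums : List Int) (T : Int) (N k : Nat) :
    ∀ (m : Nat) (mask count : Nat) (total : Int), count + m = k →
      gp nums T N k m mask count total
        = vmin ((List.sublistsLen m (freeL N mask)).map
            (fun S => |T - 2 * (total + (S.map (fun i => nums.getD i 0)).sum)|)) := by
  intro m
  induction m with
  | zero =>
    intro mask count total hck
    rw [gp, if_pos (by omega)]
    simp [List.sublistsLen_zero, vmin, optMin]
  | succ m ih =>
    intro mask count total hck
    have hne : count ≠ k := by omega
    rw [gp, if_neg hne]
    have hfun : (fun (acc : Option Int) (i : Nat) =>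
        if mask &&& (1 <<< i) ≠ 0 then acc
        else optMin acc (gp nums T N k m (mask ||| (1 <<< i)) (count + 1)
               (total + nums.getD i 0)))
      = (fun (acc : Option Int) (i : Nat) =>
        if (!mask.testBit i) = true
        then optMin acc (gp nums T N k m (mask ||| (1 <<< i)) (count + 1)
               (total + nums.getD i 0))
        else acc) := by
      funext acc i
      by_cases hb : mask.testBit i = true
      · rw [if_pos ((band_bit mask i).mpr hb), if_neg (by simp [hb])]
      · rw [if_neg (fun hc => hb ((band_bit mask i).mp hc)), if_pos (by simp at hb; simp [hb])]
    rw [hfun, ← List.foldl_filter]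
    have hg : (fun (acc : Option Int) (i : Nat) =>
        optMin acc (gp nums T N k m (mask ||| (1 <<< i)) (count + 1) (total + nums.getD i 0)))
      = (fun (acc : Option Int) (i : Nat) =>
        optMin acc (vmin ((List.sublistsLen m (freeL N (mask ||| (1 <<< i)))).map
          (fun S => |T - 2 * ((total + nums.getD i 0) + (S.map (fun j => nums.getD j 0)).sum)|)))) := by
      funext acc i
      rw [ih (mask ||| (1 <<< i)) (count + 1) (total + nums.getD i 0) (by omega)]
    rw [hg, foldl_optMin_flat]
    show optMin none _ = _
    have hnone : ∀ b : Option Int, optMin none b = b := fun b => rfl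
    rw [hnone]
    apply vmin_ext
    intro x
    simp only [List.mem_flatMap, List.mem_map, List.mem_sublistsLen, freeL_or]
    constructor
    · rintro ⟨i, hi, S, ⟨hS, hlen⟩, rfl⟩
      obtain ⟨l1, l2, hL⟩ := List.append_of_mem (show i ∈ freeL N mask from hi)
      have hnd : (l1 ++ i :: l2).Nodup := hL ▸ freeL_nodup N mask
      have hil : i ∉ l1 ∧ i ∉ l2 := by
        simp [List.nodup_append, List.nodup_cons] at hnd
        exact ⟨fun hmem => (hnd.2.2 i hmem).1 rfl, hnd.2.1.1⟩
      have hfilter : (freeL N mask).filter (fun j => !(j == i)) = l1 ++ l2 := by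
        have e1 : ∀ (mm : List Nat), i ∉ mm → mm.filter (fun j => !(j == i)) = mm := by
          intro mm him
          apply List.filter_eq_self.mpr
          intro a ha
          have : a ≠ i := fun h => him (h ▸ ha)
          simp [this]
        rw [hL, List.filter_append, List.filter_cons]
        simp only [BEq.rfl, Bool.not_true, Bool.false_eq_true, if_false, e1 l1 hil.1, e1 l2 hil.2]
      rw [hfilter] at hS
      rw [List.sublist_append_iff] at hS
      obtain ⟨s1, s2, rfl, hs1, hs2⟩ := hS
      refine ⟨s1 ++ i :: s2, ⟨by rw [hL]; exact hs1.append (hs2.cons₂ i), by simp at hlen ⊢; omega⟩, ?_⟩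
      simp only [List.map_append, List.sum_append, List.map_cons, List.sum_cons]
      ring_nf
    · rintro ⟨S, ⟨hS, hlen⟩, rfl⟩
      cases S with
      | nil => simp at hlen
      | cons a S' =>
        have hi : a ∈ freeL N mask := hS.subset List.mem_cons_self
        have hS' : S'.Sublist (freeL N mask) := (List.sublist_cons_self a S').trans hS
        have hnotmem : a ∉ S' := by
          have := hS.nodup (freeL_nodup N mask)
          exact (List.nodup_cons.mp this).1
        have hfS' : S'.filter (fun j => !(j == a)) = S' := by
          apply List.filter_eq_self.mpr
          intro b hb
          have : b ≠ a := fun h => hnotmem (h ▸ hb)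
          simp [this]
        refine ⟨a, hi, S', ⟨hfS' ▸ hS'.filter _, by simpa using hlen⟩, ?_⟩
        simp only [List.map_cons, List.sum_cons]
        ring_nf

-- memo invariant: every stored value is the memo-free value of its mask
def MemoInv (nums : List Int) (T : Int) (N k : Nat) (seen : PySem.Dict Nat (Option Int)) : Prop :=
  ∀ msk v, seen.get? msk = some v →
    v = gp nums T N k (k - cnt N msk) msk (cnt N msk) (tot nums N msk)

theorem recurA_eq_gp (nums : List Int) (T : Int) (N k : Nat) :
    ∀ (fuel : Nat) (mask count : Nat) (total : Int) (seen : PySem.Dict Nat (Option Int)),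
      MemoInv nums T N k seen → count = cnt N mask → total = tot nums N mask → count ≤ k →
      fuel = k - count →
      (recurA nums T N k fuel mask count total seen).1 = gp nums T N k fuel mask count total ∧
      MemoInv nums T N k (recurA nums T N k fuel mask count total seen).2 := by
  intro fuel
  induction fuel with
  | zero =>
    intro mask count total seen hInv hc ht hck hfuel
    have hck2 : count = k := by omega
    cases hlook : PySem.Dict.get? seen mask with
    | some v =>
      have hval := hInv mask v hlook
      simp only [recurA, hlook]
      refine ⟨?_, hInv⟩
      rw [hval, ← hc, ← ht, hfuel]
    | none =>
      simp only [recurA, hlook, if_pos hck2]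
      constructor
      · rw [gp.eq_def, if_pos hck2]
      · intro msk v hget
        rw [PySem.Dict.get?_insert] at hget
        by_cases hm : msk = mask
        · rw [if_pos hm] at hget
          injection hget with hget
          subst hm
          rw [← hget, gp.eq_def, if_pos (by omega : cnt N msk = k), ht]
        · rw [if_neg hm] at hget
          exact hInv msk v hget
  | succ fuel' ih =>
    intro mask count total seen hInv hc ht hck hfuel
    cases hlook : PySem.Dict.get? seen mask with
    | some v =>
      have hval := hInv mask v hlook
      simp only [recurA, hlook]
      refine ⟨?_, hInv⟩
      rw [hval, ← hc, ← ht, hfuel]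
    | none =>
      have hck2 : count ≠ k := by omega
      simp only [recurA, hlook, if_neg hck2]
      have loop : ∀ (l : List Nat) (acc : Option Int) (sn : PySem.Dict Nat (Option Int)),
          (∀ i ∈ l, i < N) → MemoInv nums T N k sn →
          (l.foldl (fun (st : Option Int × PySem.Dict Nat (Option Int)) i =>
              if mask &&& (1 <<< i) ≠ 0 then st
              else
                let res := recurA nums T N k fuel' (mask ||| (1 <<< i)) (count + 1)
                             (total + nums.getD i 0) st.2
                (optMin st.1 res.1, res.2)) (acc, sn)).1
            = l.foldl (fun acc i =>
                if mask &&& (1 <<< i) ≠ 0 then acc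
                else optMin acc (gp nums T N k fuel' (mask ||| (1 <<< i)) (count + 1)
                       (total + nums.getD i 0))) acc ∧
          MemoInv nums T N k
            (l.foldl (fun (st : Option Int × PySem.Dict Nat (Option Int)) i =>
              if mask &&& (1 <<< i) ≠ 0 then st
              else
                let res := recurA nums T N k fuel' (mask ||| (1 <<< i)) (count + 1)
                             (total + nums.getD i 0) st.2
                (optMin st.1 res.1, res.2)) (acc, sn)).2 := by
        intro l
        induction l with
        | nil => intro acc sn _ hIsn; exact ⟨rfl, hIsn⟩
        | cons i l ihl =>
          intro acc sn hmem hIsn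
          by_cases hbit : mask &&& (1 <<< i) ≠ 0
          · simp only [List.foldl_cons, if_pos hbit]
            exact ihl acc sn (fun j hj => hmem j (List.mem_cons_of_mem i hj)) hIsn
          · have hb : mask.testBit i = false := by
              cases hbb : mask.testBit i
              · rfl
              · exact absurd ((band_bit mask i).mpr hbb) hbit
            have hiN : i < N := hmem i List.mem_cons_self
            have hchild := ih (mask ||| (1 <<< i)) (count + 1) (total + nums.getD i 0) sn hIsn
              (by rw [cnt_or N mask i hiN hb, hc]) (by rw [tot_or nums N mask i hiN hb, ht])
              (by omega) (by omega)
            simp only [List.foldl_cons, if_neg hbit]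
            rw [hchild.1]
            exact ihl _ _ (fun j hj => hmem j (List.mem_cons_of_mem i hj)) hchild.2
      have hloop := loop (List.range N) none seen (fun i hi => List.mem_range.mp hi) hInv
      constructor
      · rw [hloop.1, gp.eq_def, if_neg hck2]
      · intro msk v hget
        rw [PySem.Dict.get?_insert] at hget
        by_cases hm : msk = mask
        · rw [if_pos hm] at hget
          injection hget with hget
          subst hm
          have h1 : k - cnt N msk = fuel' + 1 := by omega
          rw [← hget, hloop.1, h1, ← hc, ← ht, gp.eq_def, if_neg hck2]
        · rw [if_neg hm] at hget
          exact hloop.2 msk v hget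

theorem sumsB_mem (lst : List Int) : ∀ (k : Nat) (x : Int),
    x ∈ sumsB lst k ↔ ∃ c : List Int, c.Sublist lst ∧ c.length = k ∧ x = c.sum := by
  induction lst with
  | nil =>
    intro k x
    cases k with
    | zero =>
      simp only [sumsB, List.mem_singleton]
      constructor
      · rintro rfl; exact ⟨[], List.nil_sublist _, rfl, rfl⟩
      · rintro ⟨c, hc, hl, rfl⟩
        rw [List.length_eq_zero_iff] at hl
        subst hl; rfl
    | succ k' =>
      simp only [sumsB, List.length_nil]
      constructor
      · intro h; simp at h
      · rintro ⟨c, hc, hl, rfl⟩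
        rw [List.sublist_nil] at hc
        subst hc; simp at hl
  | cons y rest ih =>
    intro k x
    cases k with
    | zero =>
      simp only [sumsB, List.mem_singleton]
      constructor
      · rintro rfl; exact ⟨[], List.nil_sublist _, rfl, rfl⟩
      · rintro ⟨c, hc, hl, rfl⟩
        rw [List.length_eq_zero_iff] at hl
        subst hl; rfl
    | succ k' =>
      rw [sumsB]
      by_cases hlen : (y :: rest).length < k' + 1
      · rw [if_pos hlen]
        constructor
        · intro h; simp at h
        · rintro ⟨c, hc, hl, rfl⟩
          have := hc.length_le
          omega
      · rw [if_neg hlen]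
        simp only [List.mem_append, List.mem_map, ih]
        constructor
        · rintro (⟨s, ⟨c, hc, hl, rfl⟩, rfl⟩ | ⟨c, hc, hl, rfl⟩)
          · exact ⟨y :: c, hc.cons₂ y, by simp [hl], by simp⟩
          · exact ⟨c, hc.cons y, hl, rfl⟩
        · rintro ⟨c, hc, hl, rfl⟩
          rw [List.sublist_cons_iff] at hc
          rcases hc with hc | ⟨r, rfl, hr⟩
          · exact Or.inr ⟨c, hc, hl, rfl⟩
          · exact Or.inl ⟨r.sum, ⟨r, hr, by simpa using hl, rfl⟩, by simp⟩

theorem map_getD_range (xs : List Int) :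
    (List.range xs.length).map (fun i => xs.getD i 0) = xs := by
  apply List.ext_getElem
  · simp
  · intro i h1 h2
    simp only [List.getElem_map, List.getElem_range]
    simp [List.getD_eq_getElem?_getD, List.getElem?_eq_getElem h2]

-- ===== VERDICT (by name: the statement is the Claim_ definition above) =====
theorem minimumDifferenceTLE_spec : Claim_equal_minimumDifferenceTLE := by
  intro nums _
  unfold Spec_minimumDifferenceTLE
  simp only [minimumDifferenceTLE, minimumDifferenceTLE_alt]
  set T := nums.sum with hT
  set N := nums.length with hN
  set k := N / 2 with hk
  have hInv0 : MemoInv nums T N k PySem.Dict.empty := by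
    intro msk v h
    rw [PySem.Dict.get?_empty] at h
    exact absurd h (by simp)
  have hcnt0 : (0 : Nat) = cnt N 0 := by simp [cnt, Nat.zero_testBit]
  have htot0 : (0 : Int) = tot nums N 0 := by simp [tot, Nat.zero_testBit]
  have hM := recurA_eq_gp nums T N k k 0 0 0 PySem.Dict.empty hInv0 hcnt0 htot0
    (Nat.zero_le _) (by omega)
  rw [hM.1, gp_eq nums T N k k 0 0 0 (by omega), vmin_getD_match]
  have hfree : freeL N 0 = List.range N := by
    simp [freeL, Nat.zero_testBit]
  rw [hfree]
  congr 1
  apply vmin_ext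
  intro x
  simp only [List.mem_map, List.mem_sublistsLen, sumsB_mem]
  constructor
  · rintro ⟨S, ⟨hS, hlen⟩, rfl⟩
    refine ⟨(S.map (fun i => nums.getD i 0)).sum,
      ⟨S.map (fun i => nums.getD i 0), ?_, by simp [hlen], rfl⟩, by ring_nf⟩
    have := hS.map (fun i => nums.getD i 0)
    rwa [map_getD_range nums] at this
  · rintro ⟨s, ⟨c, hc, hlen, rfl⟩, rfl⟩
    rw [← map_getD_range nums, List.sublist_map_iff] at hc
    obtain ⟨S, hS, rfl⟩ := hc
    exact ⟨S, ⟨hS, by simpa using hlen⟩, by ring_nf⟩
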